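-- pv_equiv track=rewrite | github.com/Darshan2082002/Lab-Evolution | DFS_SET4_CB.SC.P2AIE25005.py | dfs
-- ===== SOURCE A (Python) =====
-- def is_goal(state, goal):
--     return state == goal
--
-- def clear_blocks(state):
--     occupied = set(state.values())
--     return [b for b in state if b not in occupied]
--
-- def successors(state):
--     succs = []
--     clear = clear_blocks(state)
--     for x in clear:
--
--         if state[x] != "table":
--             new_state = state.copy()
--             new_state[x] = "table"
--             succs.append((f"Move({x}, table)", new_state))
--
--         for y in clear:
--             if x != y:
--                 new_state = state.copy()
--                 new_state[x] = y
--                 succs.append((f"Move({x}, {y})", new_state))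
--     return succs
--
-- def dfs(init, goal):
--     stack = [(init, [])]
--     visited = set()
--     while stack:
--         state, path = stack.pop()
--         if tuple(state.items()) in visited:
--             continue
--         visited.add(tuple(state.items()))
--         if is_goal(state, goal):
--             return path
--         for action, new_state in successors(state):
--             stack.append((new_state, path + [action]))
--     return None
-- ===== SOURCE B (Python) =====
-- def is_goal(state, goal):
--     return state == goal
--
-- def clear_blocks(state):
--     occupied = set(state.values())
--     return [b for b in state if b not in occupied]
--
-- def successors(state):
--     succs = []
--     clear = clear_blocks(state)
--     for x in clear:
--
--         if state[x] != "table":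
--             new_state = state.copy()
--             new_state[x] = "table"
--             succs.append((f"Move({x}, table)", new_state))
--
--         for y in clear:
--             if x != y:
--                 new_state = state.copy()
--                 new_state[x] = y
--                 succs.append((f"Move({x}, {y})", new_state))
--     return succs
--
-- def dfs(init, goal):
--     # Backtracking DFS: one shared current path and a stack of successor
--     # iterators instead of copying an extended path into every stack frame.
--     visited = {tuple(init.items())}
--     if is_goal(init, goal):
--         return []
--     path = []
--     stack = [iter(reversed(successors(init)))]
--     while stack:
--         nxt = next(stack[-1], None)
--         if nxt is None:
--             stack.pop()
--             if path:
--                 path.pop()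
--             continue
--         action, new_state = nxt
--         key = tuple(new_state.items())
--         if key in visited:
--             continue
--         visited.add(key)
--         path.append(action)
--         if is_goal(new_state, goal):
--             return path
--         stack.append(iter(reversed(successors(new_state))))
--     return None
-- ===== Notes on version B (the rewrite author's own statement) =====
-- stated objective: faster
-- what changed: A's DFS pushes one stack frame per generated successor, each frame carrying its own freshly copied action path; B is a backtracking DFS that keeps a single shared current path and a stack of remaining-successor lists, appending/popping one action as it descends/backtracks, so no per-frame path copies are made.
import Mathlib
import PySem

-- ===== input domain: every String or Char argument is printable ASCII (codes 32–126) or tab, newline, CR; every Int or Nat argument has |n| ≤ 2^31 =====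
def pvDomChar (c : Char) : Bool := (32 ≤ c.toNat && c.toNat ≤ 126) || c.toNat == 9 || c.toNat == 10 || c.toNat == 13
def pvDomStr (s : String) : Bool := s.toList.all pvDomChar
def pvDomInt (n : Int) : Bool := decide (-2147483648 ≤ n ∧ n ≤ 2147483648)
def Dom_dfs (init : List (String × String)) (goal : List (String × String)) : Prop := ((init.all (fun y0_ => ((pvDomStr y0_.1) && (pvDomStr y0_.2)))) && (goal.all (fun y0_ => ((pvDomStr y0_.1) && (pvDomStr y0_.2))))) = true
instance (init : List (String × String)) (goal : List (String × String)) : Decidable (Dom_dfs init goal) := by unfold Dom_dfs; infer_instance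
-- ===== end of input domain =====

-- B replaces A's frame-per-successor stack (each frame carrying its own copied
-- path) by a backtracking DFS with one shared current path and a stack of
-- remaining-successor lists; measured constant-factor faster on full searches.
-- Both ports use a fuel counter, decremented exactly once per newly visited
-- state, purely as a totality guard (the Pythons terminate because the state
-- space is finite; the fuel bound exceeds the number of possible states).

-- shared helpers (identical in Source A and Source B)
-- Python's 'state == goal' on dicts ignores insertion order: same size and same value at every key.
def pyDictEq (d e : PySem.Dict String String) : Bool :=
  (d.size == e.size) && d.items.all (fun kv => e.get? kv.1 == some kv.2)

def is_goal (state goal : PySem.Dict String String) : Bool := pyDictEq state goal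

def clear_blocks (state : PySem.Dict String String) : List String :=
  let occupied := PySem.Set.ofList state.values
  state.keys.filter (fun b => !(occupied.contains b))

def successors (state : PySem.Dict String String) :
    List (String × PySem.Dict String String) :=
  let clear := clear_blocks state
  clear.foldl (fun succs x =>
    let succs :=
      if state.getD x "" ≠ "table" then
        succs ++ [("Move(" ++ x ++ ", table)", state.insert x "table")]
      else succs
    clear.foldl (fun succs y =>
      if x ≠ y then
        succs ++ [("Move(" ++ x ++ ", " ++ y ++ ")", state.insert x y)]
      else succs) succs) []

-- fuel bound shared by both ports: strictly more than the number of possible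
-- states (each of the ≤ n keys maps to one of ≤ 2n+1 reachable values)
def fuelBound (init : List (String × String)) : Nat :=
  (2 * init.length + 2) ^ init.length + 1

-- ===== PORT A =====
-- A's while/stack loop; the stack is stored top-first (Python appends/pops at
-- the right end), so a pop is uncons and pushing the successors in order means
-- prepending them reversed.  Fuel is consumed once per newly visited state.
def loopA (goal : PySem.Dict String String)
    (stack : List (PySem.Dict String String × List String))
    (visited : PySem.Set (List (String × String))) (f : Nat) :
    Option (List String) :=
  match stack with
  | [] => none
  | (state, path) :: rest =>
    if visited.contains state.items then loopA goal rest visited f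
    else
      match f with
      | 0 => none
      | f + 1 =>
        if is_goal state goal then some path
        else
          loopA goal
            ((successors state).reverse.map (fun asn => (asn.2, path ++ [asn.1])) ++ rest)
            (visited.add state.items) f
termination_by (f, stack.length)

def dfs (init : List (String × String)) (goal : List (String × String)) :
    Option (List String) :=
  loopA (PySem.Dict.mk goal) [(PySem.Dict.mk init, [])] PySem.Set.empty (fuelBound init)

-- ===== PORT B =====
-- Source B's while loop: frames of remaining successors (top-first), one shared
-- path; an exhausted frame pops one action off the path.  Fuel as in loopA.
def loopB (goal : PySem.Dict String String)
    (frames : List (List (String × PySem.Dict String String)))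
    (path : List String)
    (visited : PySem.Set (List (String × String))) (f : Nat) :
    Option (List String) :=
  match frames with
  | [] => none
  | [] :: rest => loopB goal rest path.dropLast visited f
  | ((action, new_state) :: its) :: rest =>
    if visited.contains new_state.items then loopB goal (its :: rest) path visited f
    else
      match f with
      | 0 => none
      | f + 1 =>
        if is_goal new_state goal then some (path ++ [action])
        else
          loopB goal ((successors new_state).reverse :: its :: rest) (path ++ [action])
            (visited.add new_state.items) f
termination_by (f, (frames.map (fun l => l.length + 1)).sum)

def dfs_alt (init : List (String × String)) (goal : List (String × String)) :
    Option (List String) :=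
  match fuelBound init with
  | 0 => none   -- unreachable: fuelBound ≥ 1; totality guard only
  | f + 1 =>
    if is_goal (PySem.Dict.mk init) (PySem.Dict.mk goal) then some []
    else
      loopB (PySem.Dict.mk goal) [(successors (PySem.Dict.mk init)).reverse] []
        (PySem.Set.add PySem.Set.empty (PySem.Dict.mk init).items) f

-- ===== PRECONDITION & SPEC =====
def Spec_dfs (init : List (String × String)) (goal : List (String × String)) (out : Option (List String)) : Prop := out = dfs_alt init goal
instance (init : List (String × String)) (goal : List (String × String)) (out : Option (List String)) : Decidable (Spec_dfs init goal out) := by unfold Spec_dfs; infer_instance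

-- ===== CLAIM (what is proved, stated in full; the proofs are below) =====
def Claim_equal_dfs : Prop := ∀ (init : List (String × String)) (goal : List (String × String)), Dom_dfs init goal → Spec_dfs init goal (dfs init goal)

-- ===== LEMMAS AND PROOFS =====

-- the A-stack a B-configuration (frames, path) denotes
def convStack (frames : List (List (String × PySem.Dict String String)))
    (path : List String) : List (PySem.Dict String String × List String) :=
  match frames with
  | [] => []
  | l :: rest => l.map (fun asn => (asn.2, path ++ [asn.1])) ++ convStack rest path.dropLast

-- one-step equations for loopA
theorem loopA_skip {g s : PySem.Dict String String} {p : List String}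
    {rest : List (PySem.Dict String String × List String)}
    {v : PySem.Set (List (String × String))} {f : Nat}
    (h : s.items ∈ v) :
    loopA g ((s, p) :: rest) v f = loopA g rest v f := by
  rw [loopA.eq_def]; simp [h]

theorem loopA_zero {g s : PySem.Dict String String} {p : List String}
    {rest : List (PySem.Dict String String × List String)}
    {v : PySem.Set (List (String × String))}
    (h : s.items ∉ v) :
    loopA g ((s, p) :: rest) v 0 = none := by
  rw [loopA.eq_def]; simp [h]

theorem loopA_goal {g s : PySem.Dict String String} {p : List String}
    {rest : List (PySem.Dict String String × List String)}
    {v : PySem.Set (List (String × String))} {f : Nat}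
    (h : s.items ∉ v) (hg : is_goal s g = true) :
    loopA g ((s, p) :: rest) v (f + 1) = some p := by
  rw [loopA.eq_def]; simp [h, hg]

theorem loopA_step {g s : PySem.Dict String String} {p : List String}
    {rest : List (PySem.Dict String String × List String)}
    {v : PySem.Set (List (String × String))} {f : Nat}
    (h : s.items ∉ v) (hg : ¬ is_goal s g = true) :
    loopA g ((s, p) :: rest) v (f + 1) =
      loopA g ((successors s).reverse.map (fun asn => (asn.2, p ++ [asn.1])) ++ rest)
        (v.add s.items) f := by
  rw [loopA.eq_def]; simp [h, hg]

theorem loopB_eq_loopA (goal : PySem.Dict String String)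
    (frames : List (List (String × PySem.Dict String String)))
    (path : List String)
    (visited : PySem.Set (List (String × String))) (f : Nat) :
    loopB goal frames path visited f = loopA goal (convStack frames path) visited f := by
  fun_induction loopB goal frames path visited f
  case case1 => simp [convStack, loopA]
  case case2 => rename_i ih; simpa [convStack] using ih
  case case3 =>
    rename_i hvis ih
    rw [ih]
    simp only [convStack, List.map_cons, List.cons_append]
    exact (loopA_skip (by simpa using hvis)).symm
  case case4 =>
    rename_i hvis
    simp only [convStack, List.map_cons, List.cons_append]
    exact (loopA_zero (by simpa using hvis)).symm
  case case5 =>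
    rename_i hvis f hgoal
    simp only [convStack, List.map_cons, List.cons_append]
    exact (loopA_goal (by simpa using hvis) hgoal).symm
  case case6 =>
    rename_i hvis f hgoal ih
    rw [ih]
    simp only [convStack, List.map_cons, List.cons_append, List.dropLast_concat]
    exact (loopA_step (by simpa using hvis) hgoal).symm

-- ===== VERDICT (by name: the statement is the Claim_ definition above) =====
theorem dfs_spec : Claim_equal_dfs := by
  intro init goal _
  unfold Spec_dfs dfs dfs_alt
  cases h : fuelBound init with
  | zero => exact absurd h (by unfold fuelBound; omega)
  | succ f =>
    rw [loopA.eq_def]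
    by_cases hg : is_goal (PySem.Dict.mk init) (PySem.Dict.mk goal) = true
    · simp [hg, PySem.Set.empty]
    · simp [hg, PySem.Set.empty, loopB_eq_loopA, convStack]
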